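-- pv_equiv track=rewrite | github.com/Pedrochem/CogsDataAug | code/substructure_verbs_pps.py | get_word_pos
-- ===== SOURCE A (Python) =====
-- def get_word_pos(inp,word):
--     splits = inp.split(' ')
--     cont = 0
--     for split in splits:
--         if split == word:
--             return cont
--         if '//' in split:
--             cont+=1
-- ===== SOURCE B (Python) =====
-- def get_word_pos(inp, word):
--     splits = inp.split(' ')
--     if word not in splits:
--         return None
--     idx = splits.index(word)
--     return sum(1 for s in splits[:idx] if '//' in s)
-- ===== Notes on version B (the rewrite author's own statement) =====
-- stated objective: simpler
-- what changed: Replaces A's fused scan that interleaves matching with counter maintenance by locate-then-count: a membership guard, one .index call to find the first occurrence, and a prefix count of '//'-tagged tokens over splits[:idx].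
import Mathlib
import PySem

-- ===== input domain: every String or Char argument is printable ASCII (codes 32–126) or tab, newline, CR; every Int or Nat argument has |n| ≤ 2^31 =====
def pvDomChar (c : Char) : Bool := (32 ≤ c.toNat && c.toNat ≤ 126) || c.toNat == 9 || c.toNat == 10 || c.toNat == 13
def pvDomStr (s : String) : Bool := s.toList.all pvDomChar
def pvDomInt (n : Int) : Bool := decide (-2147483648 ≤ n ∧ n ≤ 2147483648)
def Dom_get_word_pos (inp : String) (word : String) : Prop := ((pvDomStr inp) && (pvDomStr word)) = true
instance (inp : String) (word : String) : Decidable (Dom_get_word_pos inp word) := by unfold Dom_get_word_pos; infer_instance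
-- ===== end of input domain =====

-- B replaces A's fused match-and-count scan by locate-then-count (membership guard, .index, prefix count): simpler decomposition, same O(n) cost.

-- ===== PORT A =====
-- for split in splits: if split == word: return cont; if '//' in split: cont += 1
def pvScanA (word : String) : List String → Int → Option Int
  | [], _ => none
  | s :: rest, cont =>
    if s == word then some cont
    else pvScanA word rest (if PySem.Str.isIn "//" s then cont + 1 else cont)

def get_word_pos (inp : String) (word : String) : Option Int :=
  let splits := (PySem.Str.split? inp " ").getD []   -- sep " " ≠ "", so split? never returns none
  pvScanA word splits 0

-- ===== PORT B =====
def get_word_pos_alt (inp : String) (word : String) : Option Int :=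
  let splits := (PySem.Str.split? inp " ").getD []
  if splits.contains word then
    match PySem.List.index? splits word with
    | some idx => some (((splits.take idx).countP (fun s => PySem.Str.isIn "//" s) : Nat) : Int)
    | none => none   -- unreachable: guarded by the membership test
  else none

-- ===== PRECONDITION & SPEC =====
def Spec_get_word_pos (inp : String) (word : String) (out : Option Int) : Prop := out = get_word_pos_alt inp word
instance (inp : String) (word : String) (out : Option Int) : Decidable (Spec_get_word_pos inp word out) := by unfold Spec_get_word_pos; infer_instance

-- ===== CLAIM (what is proved, stated in full; the proofs are below) =====
def Claim_equal_get_word_pos : Prop := ∀ (inp : String) (word : String), Dom_get_word_pos inp word → Spec_get_word_pos inp word (get_word_pos inp word)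

-- ===== LEMMAS AND PROOFS =====
theorem pvScanA_eq_idx (word : String) (l : List String) (cont : Int) :
    pvScanA word l cont =
      (List.idxOf? word l).map
        (fun idx => cont + (((l.take idx).countP (fun s => PySem.Str.isIn "//" s) : Nat) : Int)) := by
  induction l generalizing cont with
  | nil => simp [pvScanA, List.idxOf?]
  | cons s rest ih =>
    by_cases h : s == word
    · simp [pvScanA, h, List.idxOf?_cons, List.take, List.countP]
    · simp only [pvScanA, h, if_false, ih, List.idxOf?_cons, Bool.false_eq_true]
      cases hr : List.idxOf? word rest with
      | none => simp
      | some k =>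
        simp [List.take_succ_cons, List.countP_cons]
        split_ifs <;> ring

-- ===== VERDICT (by name: the statement is the Claim_ definition above) =====
theorem get_word_pos_spec : Claim_equal_get_word_pos := by
  intro inp word _
  unfold Spec_get_word_pos get_word_pos get_word_pos_alt PySem.List.index?
  rw [pvScanA_eq_idx]
  set l := (PySem.Str.split? inp " ").getD [] with hl
  by_cases hc : l.contains word
  · have : (List.idxOf? word l).isSome := by
      simpa [List.isSome_idxOf?] using hc
    cases h : List.idxOf? word l with
    | none => simp [h] at this
    | some k => simp [h, List.contains_iff_mem.mp hc]
  · have : List.idxOf? word l = none := by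
      rw [List.idxOf?_eq_none_iff]
      intro hm; exact absurd (List.contains_iff_mem.mpr hm) (by simpa using hc)
    simp [this]
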